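-- pv_equiv track=rewrite | github.com/brilliantlabsAR/monocle-micropython | tools/fontgen.py | get_x_bounding_box
-- ===== SOURCE A (Python) =====
-- def get_x_bounding_box(bitmap):
--     beg_x = None
--     end_x = 0
--     for i in range(len(bitmap[0])):
--         if '1' in [x[i] for x in bitmap]:
--             if beg_x is None:
--                 beg_x = i
--             end_x = i
--     return beg_x or 0, end_x + 1
-- ===== SOURCE B (Python) =====
-- def get_x_bounding_box(bitmap):
--     w = len(bitmap[0])
--     cols = {i for row in bitmap for i, c in enumerate(row[:w]) if c == '1'}
--     return (min(cols, default=0), max(cols, default=0) + 1)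
-- ===== Notes on version B (the rewrite author's own statement) =====
-- stated objective: alternative
-- what changed: Replaces A's column-major scan (building a per-column character list and testing '1' membership while tracking running first/last state) with a row-major pass: a set comprehension enumerates each row once collecting the column indices of set pixels, then min/max reduce that set.
import Mathlib
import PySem

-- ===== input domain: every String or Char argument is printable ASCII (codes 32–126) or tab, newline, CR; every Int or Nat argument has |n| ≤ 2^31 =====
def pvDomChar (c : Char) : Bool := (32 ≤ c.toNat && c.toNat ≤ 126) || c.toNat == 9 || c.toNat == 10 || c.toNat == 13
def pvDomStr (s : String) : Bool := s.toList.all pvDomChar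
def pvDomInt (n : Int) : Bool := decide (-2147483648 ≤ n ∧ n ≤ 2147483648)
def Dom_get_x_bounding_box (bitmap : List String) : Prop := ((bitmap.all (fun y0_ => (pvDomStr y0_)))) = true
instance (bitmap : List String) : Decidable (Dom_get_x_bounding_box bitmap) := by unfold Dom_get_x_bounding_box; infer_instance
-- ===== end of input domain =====

-- B replaces A's column-major scan (per-column list build + membership + running first/last
-- state) by a row-major pass: one set comprehension collects the column index of every set
-- pixel while enumerating each row once, then min/max reduce the set; objective: alternative.

-- ===== PORT A =====
def get_x_bounding_box (bitmap : List String) : Int × Int :=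
  -- beg_x = None; end_x = 0; for i in range(len(bitmap[0])): ...
  let w : Int := (((PySem.List.pyGet? bitmap 0).getD "").toList.length : Int)
  let st := (PySem.List.pyRange 0 w 1).foldl
    (fun (st : Option Int × Int) i =>
      if (bitmap.map (fun x => PySem.Str.pyGet? x i)).contains (some '1')
      then ((if st.1.isNone then some i else st.1), i)
      else st)
    (none, 0)
  -- `beg_x or 0`: beg_x is None or a nonnegative int; 0 is falsy so this is exactly getD 0
  (st.1.getD 0, st.2 + 1)

-- ===== PORT B =====
def get_x_bounding_box_alt (bitmap : List String) : Int × Int :=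
  -- w = len(bitmap[0])
  let w : Int := (((PySem.List.pyGet? bitmap 0).getD "").toList.length : Int)
  -- cols = {i for row in bitmap for i, c in enumerate(row[:w]) if c == '1'}
  let cols : List Int := PySem.Set.ofList
    (bitmap.flatMap (fun row =>
      (PySem.List.enumerate (PySem.Str.slice row none (some w)).toList 0).filterMap
        (fun p => if p.2 = '1' then some p.1 else none)))
  -- (min(cols, default=0), max(cols, default=0) + 1)
  ((PySem.List.min? cols (fun x => x)).getD 0,
   ((PySem.List.max? cols (fun x => x)).getD 0) + 1)

-- ===== PRECONDITION & SPEC =====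
-- Pre_ excludes exactly the inputs where the Python A raises IndexError: the empty list
-- (bitmap[0]) and ragged bitmaps with some row shorter than the first row (x[i]).
def Pre_get_x_bounding_box (bitmap : List String) : Prop :=
  bitmap ≠ [] ∧ ∀ s ∈ bitmap, (bitmap.headD "").toList.length ≤ s.toList.length
instance (bitmap : List String) : Decidable (Pre_get_x_bounding_box bitmap) := by
  unfold Pre_get_x_bounding_box; infer_instance
def pvWitness_get_x_bounding_box : List String := ["0100", "0010"]

def Spec_get_x_bounding_box (bitmap : List String) (out : Int × Int) : Prop := out = get_x_bounding_box_alt bitmap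
instance (bitmap : List String) (out : Int × Int) : Decidable (Spec_get_x_bounding_box bitmap out) := by unfold Spec_get_x_bounding_box; infer_instance

-- ===== CLAIM (what is proved, stated in full; the proofs are below) =====
def Claim_equal_get_x_bounding_box : Prop := ∀ (bitmap : List String), Dom_get_x_bounding_box bitmap → Pre_get_x_bounding_box bitmap → Spec_get_x_bounding_box bitmap (get_x_bounding_box bitmap)

-- ===== LEMMAS AND PROOFS =====
set_option maxHeartbeats 1000000

-- A's loop computes (first, last) of the columns satisfying p, i.e. head?/getLastD of the filter.
theorem foldA_eq (p : Int → Bool) (l : List Int) (b : Option Int) (e : Int) :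
    l.foldl (fun (st : Option Int × Int) i =>
        if p i then ((if st.1.isNone then some i else st.1), i) else st) (b, e)
    = (b.or (l.filter p).head?, (l.filter p).getLastD e) := by
  induction l generalizing b e with
  | nil => simp
  | cons a t ih =>
    simp only [List.foldl_cons, List.filter_cons]
    by_cases h : p a
    · rw [if_pos h, if_pos h, ih]
      cases b
      · simp only [Option.isNone_none, if_true, List.head?_cons,
          List.getLastD_cons, Option.or]
      · simp only [Option.isNone_some, List.getLastD_cons, Option.or, Bool.false_eq_true,
          if_false]
    · rw [if_neg h, if_neg h, ih]

theorem getLastD_mem (a : Int) (t : List Int) : (a :: t).getLastD 0 ∈ a :: t := by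
  induction t generalizing a with
  | nil => simp
  | cons b t ih =>
    have : (a :: b :: t).getLastD 0 = (b :: t).getLastD 0 := by simp
    rw [this]
    exact List.mem_cons_of_mem a (ih b)

theorem sorted_le_getLastD (a : Int) (t : List Int) (h : (a :: t).Pairwise (· ≤ ·)) :
    ∀ y ∈ a :: t, y ≤ (a :: t).getLastD 0 := by
  induction t generalizing a with
  | nil => simp
  | cons b t ih =>
    intro y hy
    have hab : a ≤ b := (List.pairwise_cons.1 h).1 b (by simp)
    have h2 := (List.pairwise_cons.1 h).2
    have hL : (a :: b :: t).getLastD 0 = (b :: t).getLastD 0 := by simp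
    rw [hL]
    rcases List.mem_cons.1 hy with rfl | hy'
    · exact le_trans hab (ih b h2 b (by simp))
    · exact ih b h2 y hy'

theorem sorted_head_le (a : Int) (t : List Int) (h : (a :: t).Pairwise (· ≤ ·)) :
    ∀ y ∈ a :: t, a ≤ y := by
  intro y hy
  rcases List.mem_cons.1 hy with rfl | hy'
  · exact le_refl y
  · exact (List.pairwise_cons.1 h).1 y hy'

theorem pyGet?_zero {α : Type} (a : α) (l : List α) :
    PySem.List.pyGet? (a :: l) 0 = some a := by
  simp [PySem.List.pyGet?, PySem.List.pyIdx?]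

-- row[:w] with w = (wn : Nat) is exactly take wn (no length condition needed)
theorem slice_take_fun (wn : Nat) (row : String) :
    (PySem.Str.slice row none (some (wn : Int))).toList = row.toList.take wn := by
  rw [PySem.Str.toList_slice, PySem.Chars.slice_eq_listSlice, PySem.List.slice_to_natCast]

-- membership in one row's comprehension: a column k < wn holding '1' in that row
theorem row_mem (rl : List Char) (wn : Nat) (x : Int) :
    (x ∈ (PySem.List.enumerate (rl.take wn) 0).filterMap
        (fun q => if q.2 = '1' then some q.1 else none))
    ↔ ∃ k : Nat, k < wn ∧ k < rl.length ∧ rl[k]? = some '1' ∧ x = (k : Int) := by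
  rw [List.mem_filterMap]
  constructor
  · rintro ⟨q, hq, hif⟩
    obtain ⟨k, hk, rfl⟩ := (PySem.List.mem_enumerate_iff _ _ _).1 hq
    have hk' : k < wn ∧ k < rl.length := by
      have := hk; simp only [List.length_take, Nat.lt_min] at this; exact this
    have hget : (rl.take wn)[k] = rl[k]'(hk'.2) := List.getElem_take
    by_cases hc : (rl.take wn)[k] = '1'
    · rw [if_pos hc] at hif
      refine ⟨k, hk'.1, hk'.2, ?_, by simpa using hif.symm⟩
      rw [List.getElem?_eq_getElem hk'.2, ← hget, hc]
    · rw [if_neg hc] at hif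
      exact absurd hif (by simp)
  · rintro ⟨k, hkw, hkl, hk1, rfl⟩
    have hk : k < (rl.take wn).length := by simp [List.length_take]; omega
    refine ⟨((0 : Int) + (k : Int), (rl.take wn)[k]), (PySem.List.mem_enumerate_iff _ _ _).2 ⟨k, hk, rfl⟩, ?_⟩
    have hget : (rl.take wn)[k] = rl[k]'hkl := List.getElem_take
    have hc : (rl.take wn)[k] = '1' := by
      rw [hget]
      rw [List.getElem?_eq_getElem hkl] at hk1
      injection hk1
    rw [if_pos hc]
    simp

-- min/max of any list with the same members as a sorted list s are head/last of s.

theorem min?_of_same_mem (l s : List Int) (hs : s.Pairwise (· ≤ ·))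
    (hmem : ∀ x, x ∈ l ↔ x ∈ s) :
    PySem.List.min? l (fun x => x) = s.head? := by
  cases s with
  | nil =>
    have : l = [] := List.eq_nil_iff_forall_not_mem.2 (fun x hx => by simp [hmem x] at hx)
    subst this; rfl
  | cons a t =>
    have hal : a ∈ l := (hmem a).2 (by simp)
    cases hl : l with
    | nil => simp [hl] at hal
    | cons x u =>
      rw [PySem.List.min?_id_cons]
      have hm : PySem.List.min? l (fun x => x) = some (u.foldl min x) := by
        rw [hl, PySem.List.min?_id_cons]
      have hmem' : u.foldl min x ∈ l := PySem.List.min?_mem hm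
      have hmin : ∀ y ∈ l, u.foldl min x ≤ y := by
        intro y hy
        have := PySem.List.min?_isMin hm y hy
        simpa using this
      have h1 : a ≤ u.foldl min x := sorted_head_le a t hs _ ((hmem _).1 hmem')
      have h2 : u.foldl min x ≤ a := hmin a hal
      simp [le_antisymm h2 h1]

theorem max?_of_same_mem (l s : List Int) (hs : s.Pairwise (· ≤ ·))
    (hmem : ∀ x, x ∈ l ↔ x ∈ s) :
    PySem.List.max? l (fun x => x) = some (s.getLastD 0) ∨ (s = [] ∧ l = []) := by
  cases s with
  | nil =>
    exact Or.inr ⟨rfl, List.eq_nil_iff_forall_not_mem.2 (fun x hx => by simp [hmem x] at hx)⟩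
  | cons a t =>
    left
    have hal : a ∈ l := (hmem a).2 (by simp)
    cases hl : l with
    | nil => simp [hl] at hal
    | cons x u =>
      have hm : PySem.List.max? l (fun x => x) = some (u.foldl max x) := by
        rw [hl, PySem.List.max?_id_cons]
      have hmem' : u.foldl max x ∈ l := PySem.List.max?_mem hm
      have hmax : ∀ y ∈ l, y ≤ u.foldl max x := by
        intro y hy
        have := PySem.List.max?_isMax hm y hy
        simpa using this
      have h1 : u.foldl max x ≤ (a :: t).getLastD 0 :=
        sorted_le_getLastD a t hs _ ((hmem _).1 hmem')
      have h2 : (a :: t).getLastD 0 ≤ u.foldl max x :=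
        hmax _ ((hmem _).2 (getLastD_mem a t))
      rw [PySem.List.max?_id_cons]
      exact congrArg some (le_antisymm h1 h2)

-- ===== VERDICT (by name: the statement is the Claim_ definition above) =====
theorem get_x_bounding_box_spec : Claim_equal_get_x_bounding_box := by
  intro bitmap _ hpre
  obtain ⟨hne, hlen⟩ := hpre
  obtain ⟨r0, rest, rfl⟩ : ∃ r0 rest, bitmap = r0 :: rest := by
    cases bitmap with
    | nil => exact absurd rfl hne
    | cons r t => exact ⟨r, t, rfl⟩
  have hlen' : ∀ s ∈ r0 :: rest, r0.toList.length ≤ s.toList.length := by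
    simpa using hlen
  unfold Spec_get_x_bounding_box get_x_bounding_box get_x_bounding_box_alt
  rw [pyGet?_zero, Option.getD_some]
  simp only [slice_take_fun r0.toList.length]
  set wn : Nat := r0.toList.length with hwn
  set p : Int → Bool :=
    (fun i => ((r0 :: rest).map (fun x => PySem.Str.pyGet? x i)).contains (some '1')) with hp
  set S : List Int := (PySem.List.pyRange 0 (wn : Int) 1).filter p with hS
  set L : List Int := PySem.Set.ofList
    ((r0 :: rest).flatMap (fun row =>
      (PySem.List.enumerate (row.toList.take wn) 0).filterMap
        (fun q => if q.2 = '1' then some q.1 else none))) with hL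
  have hmem : ∀ x, x ∈ L ↔ x ∈ S := by
    intro x
    rw [hL, hS, PySem.Set.mem_ofList, List.mem_flatMap, List.mem_filter,
        PySem.List.mem_pyRange_one]
    constructor
    · rintro ⟨row, hrow, hx⟩
      obtain ⟨k, hkw, hkl, hk1, rfl⟩ := (row_mem row.toList wn x).1 hx
      refine ⟨⟨by exact_mod_cast Nat.zero_le k, by exact_mod_cast hkw⟩, ?_⟩
      rw [hp]
      simp only [List.contains_eq_mem, List.mem_map, decide_eq_true_eq]
      exact ⟨row, hrow, by rw [PySem.Str.pyGet?_natCast]; exact hk1⟩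
    · rintro ⟨⟨hx0, hxw⟩, hpx⟩
      rw [hp] at hpx
      simp only [List.contains_eq_mem, List.mem_map, decide_eq_true_eq] at hpx
      obtain ⟨row, hrow, hget⟩ := hpx
      refine ⟨row, hrow, (row_mem row.toList wn x).2 ⟨x.toNat, ?_, ?_, ?_, by omega⟩⟩
      · omega
      · have := hlen' row hrow; omega
      · have hxk : x = ((x.toNat : Nat) : Int) := by omega
        rw [hxk, PySem.Str.pyGet?_natCast] at hget
        exact hget
  have hpw : S.Pairwise (· ≤ ·) := by
    rw [hS]
    exact ((PySem.List.pairwise_lt_pyRange_one 0 (wn : Int)).filter p).imp le_of_lt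
  rw [foldA_eq p, ← hS]
  have hmin := min?_of_same_mem L S hpw hmem
  have hmax := max?_of_same_mem L S hpw hmem
  clear hS hL hmem hpw
  clear_value S L
  cases S with
  | nil =>
    have hLnil : L = [] := (PySem.List.min?_eq_none_iff L (fun x : Int => x)).1 (by simpa using hmin)
    subst hLnil
    simp [PySem.List.min?, PySem.List.max?]
  | cons a t =>
    rcases hmax with hmax | ⟨h1, _⟩
    · rw [hmin, hmax]
      simp
    · exact absurd h1 (by simp)
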